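-- pv_equiv track=rewrite | github.com/Hankhehe/SendPacket | CreateData/iprelated.py | ConvertIPv6ShortToIPv6Full
-- ===== SOURCE A (Python) =====
-- def ConvertIPv6ShortToIPv6Full(ipv6:str) -> str | None:
--       iplist = ipv6.split('::')
--       if len(iplist) > 2 or len(ipv6.split(':')) > 8:
--          return
--       ipaddr = ['0000'] * 8
--       preip = iplist[0].split(':')
--       idx = 0
--       for i in preip :
--          ipaddr[idx] = i.zfill(4)
--          idx += 1
--       if len(iplist) == 2 :
--          postip = iplist[1].split(':')
--          if len(postip) > 4 : return
--          idx = -1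
--          for i in postip[::-1] :
--                ipaddr[idx] = i.zfill(4)
--                idx -= 1
--       return ':'.join(ipaddr)
-- ===== SOURCE B (Python) =====
-- def ConvertIPv6ShortToIPv6Full(ipv6: str):
--     # String-rewriting approach: normalize the text to exactly 8 colon-separated
--     # groups by splicing literal '0' groups into the string, then do ONE uniform
--     # zfill pass over the normalized string.
--     if ipv6.count('::') > 1 or ipv6.count(':') > 7:
--         return None
--     if '::' in ipv6:
--         pre, _, post = ipv6.partition('::')
--         if post.count(':') > 3:
--             return None
--         missing = 6 - pre.count(':') - post.count(':')
--         full = pre + ':' + '0:' * missing + post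
--     else:
--         full = ipv6 + ':0' * (7 - ipv6.count(':'))
--     return ':'.join(g.zfill(4) for g in full.split(':'))
-- ===== Notes on version B (the rewrite author's own statement) =====
-- stated objective: alternative
-- what changed: B is a string-rewriting normalizer: it locates the '::' with partition, splices the literal missing '0' groups into the text itself (pre + ':' + '0:'*missing + post, or appends ':0' groups when there is no '::'), and then makes one uniform zfill-and-join pass over the normalized 8-group string, instead of A's preallocated ['0000']*8 array overwritten by forward and negative-index backward write loops.
import Mathlib
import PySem

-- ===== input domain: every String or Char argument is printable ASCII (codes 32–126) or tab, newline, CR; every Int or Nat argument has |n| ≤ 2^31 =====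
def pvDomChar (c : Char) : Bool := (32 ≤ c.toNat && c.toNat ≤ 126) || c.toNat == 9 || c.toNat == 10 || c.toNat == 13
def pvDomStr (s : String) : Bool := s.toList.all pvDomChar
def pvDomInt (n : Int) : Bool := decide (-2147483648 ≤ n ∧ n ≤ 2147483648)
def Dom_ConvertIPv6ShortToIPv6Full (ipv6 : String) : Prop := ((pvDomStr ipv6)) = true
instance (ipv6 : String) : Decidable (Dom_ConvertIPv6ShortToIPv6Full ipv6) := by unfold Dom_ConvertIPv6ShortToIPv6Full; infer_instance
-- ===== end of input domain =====

-- B normalizes the TEXT itself (partition at '::', splice literal '0' groups into the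
-- string, one uniform zfill-and-join pass) instead of A's preallocated ['0000']*8 array
-- overwritten by forward and negative-index backward write loops (objective: alternative).

-- s.split(sep) for a nonempty literal sep (exact: PySem.Chars.splitOn is Python's split)
def pySplit (s sep : String) : List String :=
  (PySem.Chars.splitOn s.toList sep.toList).map String.ofList

-- ===== PORT A =====
def ConvertIPv6ShortToIPv6Full (ipv6 : String) : Option String :=
  let iplist := pySplit ipv6 "::"
  if iplist.length > 2 ∨ (pySplit ipv6 ":").length > 8 then none
  else
    let ipaddr : List String := List.replicate 8 "0000"
    let preip := pySplit iplist.headI ":"   -- iplist[0]; split never returns an empty list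
    let st := preip.foldl
      (fun (st : List String × Int) i => (PySem.List.pySetD st.1 st.2 (PySem.Str.zfill i 4), st.2 + 1))
      (ipaddr, 0)
    if iplist.length == 2 then
      let postip := pySplit (iplist.getD 1 "") ":"   -- iplist[1]
      if postip.length > 4 then none
      else
        let st2 := postip.reverse.foldl   -- for i in postip[::-1]
          (fun (st : List String × Int) i => (PySem.List.pySetD st.1 st.2 (PySem.Str.zfill i 4), st.2 - 1))
          (st.1, -1)
        some (PySem.Str.join ":" st2.1)
    else some (PySem.Str.join ":" st.1)

-- ===== PORT B =====
-- Source B works on the text: count/in/partition, splice '0:'*missing (resp. append ':0'*k)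
-- into the string, then one uniform zfill pass over the split of the normalized string.
def ConvertIPv6ShortToIPv6Full_alt (ipv6 : String) : Option String :=
  let cs := ipv6.toList
  if PySem.Chars.count cs [':', ':'] > 1 ∨ PySem.Chars.count cs [':'] > 7 then none
  else if PySem.Chars.isIn [':', ':'] cs then
    -- pre, _, post = ipv6.partition('::')  (partition = split at the FIRST occurrence)
    let i := (PySem.Chars.find cs [':', ':']).toNat
    let pre := cs.take i
    let post := cs.drop (i + 2)
    if PySem.Chars.count post [':'] > 3 then none
    else
      -- full = pre + ':' + '0:' * missing + post   ('s' * n is '' for n ≤ 0: Int.toNat)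
      let missing := ((6 : Int) - PySem.Chars.count pre [':'] - PySem.Chars.count post [':']).toNat
      let full := pre ++ [':'] ++ (List.replicate missing ['0', ':']).flatten ++ post
      some (String.ofList (PySem.Chars.join [':']
        ((PySem.Chars.splitOn full [':']).map (fun g => PySem.Chars.zfill g 4))))
  else
    -- full = ipv6 + ':0' * (7 - ipv6.count(':'))
    let full := cs ++ (List.replicate ((7 : Int) - PySem.Chars.count cs [':']).toNat [':', '0']).flatten
    some (String.ofList (PySem.Chars.join [':']
      ((PySem.Chars.splitOn full [':']).map (fun g => PySem.Chars.zfill g 4))))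

-- ===== PRECONDITION & SPEC =====
def Spec_ConvertIPv6ShortToIPv6Full (ipv6 : String) (out : Option String) : Prop := out = ConvertIPv6ShortToIPv6Full_alt ipv6
instance (ipv6 : String) (out : Option String) : Decidable (Spec_ConvertIPv6ShortToIPv6Full ipv6 out) := by unfold Spec_ConvertIPv6ShortToIPv6Full; infer_instance

-- ===== CLAIM (what is proved, stated in full; the proofs are below) =====
def Claim_equal_ConvertIPv6ShortToIPv6Full : Prop := ∀ (ipv6 : String), Dom_ConvertIPv6ShortToIPv6Full ipv6 → Spec_ConvertIPv6ShortToIPv6Full ipv6 (ConvertIPv6ShortToIPv6Full ipv6)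

-- ===== LEMMAS AND PROOFS =====

-- Both ports are proved equal to this common normal form: the zfilled pre-groups,
-- then the computed count of '0000' middle groups, then the zfilled post-groups.
def pvConcat (ipv6 : String) : Option String :=
  let parts := pySplit ipv6 "::"
  if parts.length > 2 ∨ (pySplit ipv6 ":").length > 8 then none
  else
    let head := (pySplit parts.headI ":").map (fun g => PySem.Str.zfill g 4)
    if parts.length == 2 then
      let tail := (pySplit (parts.getD 1 "") ":").map (fun g => PySem.Str.zfill g 4)
      if tail.length > 4 then none
      else some (PySem.Str.join ":" (head ++ List.replicate (8 - head.length - tail.length) "0000" ++ tail))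
    else some (PySem.Str.join ":" (head ++ List.replicate (8 - head.length) "0000"))

-- ---------- A-side lemmas (array-write loops → take/map/drop) ----------

-- the ':'-count bookkeeping of a '::'-split: each consumed separator accounts for 2 colons
theorem go2_count (fuel : Nat) : ∀ (l cur : List Char) (acc : List (List Char)),
    l.length < fuel →
    ((PySem.Chars.splitOn.go [':',':'] fuel l cur acc).map (fun p => p.count ':')).sum
      + 2 * ((PySem.Chars.splitOn.go [':',':'] fuel l cur acc).length - 1)
    = (acc.map (fun p => p.count ':')).sum + 2 * acc.length + cur.count ':' + l.count ':' := by
  induction fuel with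
  | zero => intro l cur acc h; omega
  | succ n ih =>
    intro l cur acc h
    match l with
    | [] =>
      rw [PySem.Chars.splitOn.go]
      · simp [List.count_reverse]
        omega
      · omega
    | c :: rest =>
      rw [PySem.Chars.splitOn.go]
      by_cases hc : c = ':'
      · subst hc
        cases rest with
        | nil =>
          have hp : ([':',':'] : List Char).isPrefixOf [':'] = false := by decide
          rw [hp]
          simp only [Bool.false_eq_true, if_false]
          rw [ih [] (':' :: cur) acc (by simp at h ⊢; omega)]
          simp
          omega
        | cons d rest' =>
          by_cases hd : d = ':'
          · subst hd
            have hp : ([':',':'] : List Char).isPrefixOf (':' :: ':' :: rest') = true := by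
              simp [List.isPrefixOf]
            rw [hp]
            simp only [if_true, List.length_cons, List.length_nil, List.drop_succ_cons,
              List.drop_zero]
            rw [ih rest' [] (cur.reverse :: acc) (by simp at h ⊢; omega)]
            simp [List.count_reverse]
            omega
          · have hb : (':' == d) = false := beq_eq_false_iff_ne.mpr (Ne.symm hd)
            have hp : ([':',':'] : List Char).isPrefixOf (':' :: d :: rest') = false := by
              simp [List.isPrefixOf, hb]
            rw [hp]
            simp only [Bool.false_eq_true, if_false]
            rw [ih (d :: rest') (':' :: cur) acc (by simp at h ⊢; omega)]
            simp [List.count_cons]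
            omega
      · have hb : (':' == c) = false := beq_eq_false_iff_ne.mpr (Ne.symm hc)
        have hp : ([':',':'] : List Char).isPrefixOf (c :: rest) = false := by
          simp [List.isPrefixOf, hb]
        rw [hp]
        simp only [Bool.false_eq_true, if_false]
        rw [ih rest (c :: cur) acc (by simp at h ⊢; omega)]
        simp [hc]

-- length of a ':'-split = number of ':' + 1
theorem go1_len (fuel : Nat) : ∀ (l cur : List Char) (acc : List (List Char)),
    l.length < fuel →
    (PySem.Chars.splitOn.go [':'] fuel l cur acc).length = acc.length + 1 + l.count ':' := by
  induction fuel with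
  | zero => intro l cur acc h; omega
  | succ n ih =>
    intro l cur acc h
    match l with
    | [] =>
      rw [PySem.Chars.splitOn.go]
      · simp
      · omega
    | c :: rest =>
      rw [PySem.Chars.splitOn.go]
      by_cases hc : c = ':'
      · subst hc
        simp only [List.isPrefixOf, beq_self_eq_true, Bool.true_and, if_true,
          List.length_cons, List.length_nil, List.drop_succ_cons, List.drop_zero]
        rw [ih rest [] (cur.reverse :: acc) (by simp at h; omega)]
        simp
        omega
      · have hb : (':' == c) = false := beq_eq_false_iff_ne.mpr (Ne.symm hc)
        have hp : ([':'] : List Char).isPrefixOf (c :: rest) = false := by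
          simp [List.isPrefixOf, hb]
        rw [hp]
        simp only [Bool.false_eq_true, if_false]
        rw [ih rest (c :: cur) acc (by simp at h ⊢; omega)]
        simp [hc]

theorem splitOn2_count (s : List Char) :
    ((PySem.Chars.splitOn s [':',':']).map (fun p => p.count ':')).sum
      + 2 * ((PySem.Chars.splitOn s [':',':']).length - 1) = s.count ':' := by
  have := go2_count (s.length + 1) s [] [] (by omega)
  simpa [PySem.Chars.splitOn] using this

theorem pySplit_colon_len (s : String) :
    (pySplit s ":").length = s.toList.count ':' + 1 := by
  have h := go1_len (s.toList.length + 1) s.toList [] [] (by omega)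
  have e : (pySplit s ":").length
      = (PySem.Chars.splitOn.go [':'] (s.toList.length + 1) s.toList [] []).length := by
    simp [pySplit, PySem.Chars.splitOn, show (":" : String).toList = [':'] from rfl]
  rw [e, h]
  simp
  omega

-- A's forward write loop overwrites a prefix of the array
theorem fwd_loop (f : String → String) : ∀ (l arr : List String) (k : Nat),
    k + l.length ≤ arr.length →
    l.foldl (fun (st : List String × Int) i => (PySem.List.pySetD st.1 st.2 (f i), st.2 + 1)) (arr, (k : Int))
      = (arr.take k ++ l.map f ++ arr.drop (k + l.length), (k : Int) + l.length) := by
  intro l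
  induction l with
  | nil =>
    intro arr k h
    simp [List.take_append_drop]
  | cons x t ih =>
    intro arr k h
    have hk : k < arr.length := by simp at h; omega
    simp only [List.foldl_cons, PySem.List.pySetD_natCast]
    have hcast : ((k : Int) + 1) = (((k + 1 : Nat)) : Int) := by push_cast; ring
    rw [hcast, ih (arr.set k (f x)) (k + 1) (by simp at h ⊢; omega)]
    have hm : arr.set k (f x) = arr.take k ++ f x :: arr.drop (k + 1) := by
      rw [List.set_eq_take_append_cons_drop, if_pos hk]
    have hfst : (arr.set k (f x)).take (k + 1) ++ t.map f ++ (arr.set k (f x)).drop (k + 1 + t.length)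
        = arr.take k ++ f x :: t.map f ++ arr.drop (k + (t.length + 1)) := by
      rw [hm, List.take_append, List.drop_append, List.take_take, List.drop_take]
      have lA : (arr.take k).length = k := by simp; omega
      rw [lA]
      have e0 : min (k + 1) k = k := by omega
      have e1 : k + 1 - k = 1 := by omega
      have e2 : k - (k + 1 + t.length) = 0 := by omega
      have e3 : k + 1 + t.length - k = t.length + 1 := by omega
      rw [e0, e1, e2, e3]
      simp only [List.take_zero, List.take_succ_cons, List.drop_succ_cons, List.drop_drop,
        List.nil_append]
      have e5 : k + 1 + t.length = k + (t.length + 1) := by omega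
      rw [e5]
      simp
    simp only [Prod.mk.injEq]
    constructor
    · simpa using hfst
    · push_cast [List.length_cons]
      try ring
      try omega

-- A's backward (negative-index) write loop overwrites a suffix of the array
theorem bwd_loop (f : String → String) : ∀ (l arr : List String),
    l.length ≤ arr.length →
    l.reverse.foldl (fun (st : List String × Int) i => (PySem.List.pySetD st.1 st.2 (f i), st.2 - 1)) (arr, -1)
      = (arr.take (arr.length - l.length) ++ l.map f, -1 - (l.length : Int)) := by
  intro l
  induction l with
  | nil =>
    intro arr h
    rw [List.foldl_reverse]
    simp
  | cons x t ih =>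
    intro arr h
    have ht : t.length ≤ arr.length := by simp at h; omega
    have hts : t.length + 1 ≤ arr.length := by simpa using h
    rw [List.foldl_reverse, List.foldr_cons, ← List.foldl_reverse]
    rw [ih arr ht]
    have hlen : (arr.take (arr.length - t.length) ++ t.map f).length = arr.length := by
      simp
      omega
    have hidx : PySem.List.pySetD (arr.take (arr.length - t.length) ++ t.map f)
        (-1 - (t.length : Int)) (f x)
        = (arr.take (arr.length - t.length) ++ t.map f).set (arr.length - t.length - 1) (f x) := by
      simp only [PySem.List.pySetD, PySem.List.pySet?, PySem.List.pyIdx?, hlen]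
      have h1 : ¬ (0 ≤ (-1 - (t.length : Int))) := by omega
      have h2 : -(arr.length : Int) ≤ -1 - (t.length : Int) := by omega
      rw [if_neg h1, if_pos h2]
      have h3 : (-(-1 - (t.length : Int))).toNat = t.length + 1 := by omega
      rw [h3]
      have h4 : arr.length - (t.length + 1) = arr.length - t.length - 1 := by omega
      rw [h4]
      simp
    have hfst : (arr.take (arr.length - t.length) ++ t.map f).set (arr.length - t.length - 1) (f x)
        = arr.take (arr.length - (t.length + 1)) ++ f x :: t.map f := by
      rw [List.set_append]
      rw [if_pos (by simp; omega)]
      rw [List.set_eq_take_append_cons_drop]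
      rw [if_pos (by simp; omega)]
      rw [List.take_take, List.drop_take]
      have e1 : min (arr.length - t.length - 1) (arr.length - t.length) = arr.length - (t.length + 1) := by omega
      have e2 : arr.length - t.length - (arr.length - t.length - 1 + 1) = 0 := by omega
      rw [e1, e2]
      simp
    simp only [hidx, hfst, List.length_cons, List.map_cons, Prod.mk.injEq]
    constructor
    · trivial
    · push_cast
      try ring
      try omega

-- the same backward loop, in foldr form (foldl over postip[::-1] = foldr over postip)
theorem bwd_loop_foldr (f : String → String) (l arr : List String)
    (h : l.length ≤ arr.length) :
    l.foldr (fun x (st : List String × Int) => (PySem.List.pySetD st.1 st.2 (f x), st.2 - 1)) (arr, -1)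
      = (arr.take (arr.length - l.length) ++ l.map f, -1 - (l.length : Int)) := by
  have hb := bwd_loop f l arr h
  rw [List.foldl_reverse] at hb
  exact hb

-- ---------- B-side lemmas (count / find / partition / split-of-spliced-text) ----------

-- splitOn.go / count.go on empty input, any fuel
theorem go_nil (sep : List Char) (f : Nat) (cur : List Char) (acc : List (List Char)) :
    PySem.Chars.splitOn.go sep f [] cur acc = acc.reverse ++ [cur.reverse] := by
  cases f with
  | zero => rw [PySem.Chars.splitOn.go.eq_1]; simp
  | succ n => rw [PySem.Chars.splitOn.go.eq_2 sep _ cur acc (by omega)]; simp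

theorem cgo_nil (sub : List Char) (f : Nat) (a : Nat) :
    PySem.Chars.count.go sub f [] a = a := by
  cases f with
  | zero => rw [PySem.Chars.count.go.eq_1]
  | succ n => rw [PySem.Chars.count.go.eq_2 sub _ a (by omega)]

-- splitOn.go is fuel-irrelevant once the fuel exceeds the input length
theorem go_fuelirr (sep : List Char) (hs : sep ≠ []) : ∀ (f1 : Nat), ∀ (f2 : Nat) (l cur : List Char) (acc : List (List Char)),
    l.length < f1 → l.length < f2 →
    PySem.Chars.splitOn.go sep f1 l cur acc = PySem.Chars.splitOn.go sep f2 l cur acc := by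
  have hsl : 1 ≤ sep.length := List.length_pos_iff.mpr hs
  intro f1
  induction f1 with
  | zero => intro f2 l cur acc h1 h2; omega
  | succ n ih =>
    intro f2 l cur acc h1 h2
    obtain ⟨m, rfl⟩ := Nat.exists_eq_succ_of_ne_zero (n := f2) (by omega)
    match l with
    | [] => rw [go_nil, go_nil]
    | c :: rest =>
      rw [PySem.Chars.splitOn.go.eq_3, PySem.Chars.splitOn.go.eq_3]
      by_cases hp : sep.isPrefixOf (c :: rest)
      · rw [if_pos hp, if_pos hp]
        exact ih m _ [] _ (by simp at h1 ⊢; omega) (by simp at h2 ⊢; omega)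
      · rw [if_neg hp, if_neg hp]
        exact ih m rest (c :: cur) acc (by simp at h1 ⊢; omega) (by simp at h2 ⊢; omega)

-- the accumulator of splitOn.go is just prepended (reversed) to the result
theorem go_acc (sep : List Char) : ∀ (f : Nat) (l cur : List Char) (acc : List (List Char)),
    PySem.Chars.splitOn.go sep f l cur acc
      = acc.reverse ++ PySem.Chars.splitOn.go sep f l cur [] := by
  intro f
  induction f with
  | zero =>
    intro l cur acc
    rw [PySem.Chars.splitOn.go.eq_1, PySem.Chars.splitOn.go.eq_1]
    simp
  | succ n ih =>
    intro l cur acc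
    match l with
    | [] => rw [go_nil, go_nil]; simp
    | c :: rest =>
      rw [PySem.Chars.splitOn.go.eq_3, PySem.Chars.splitOn.go.eq_3]
      by_cases hp : sep.isPrefixOf (c :: rest)
      · rw [if_pos hp, if_pos hp, ih _ [] (cur.reverse :: acc), ih _ [] [cur.reverse]]
        simp
      · rw [if_neg hp, if_neg hp, ih rest (c :: cur) acc]

-- count.go is fuel-irrelevant once the fuel reaches the input length
theorem cgo_fuelirr (sep : List Char) (hs : sep ≠ []) : ∀ (f1 : Nat), ∀ (f2 : Nat) (l : List Char) (a : Nat),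
    l.length ≤ f1 → l.length ≤ f2 →
    PySem.Chars.count.go sep f1 l a = PySem.Chars.count.go sep f2 l a := by
  have hsl : 1 ≤ sep.length := List.length_pos_iff.mpr hs
  intro f1
  induction f1 with
  | zero =>
    intro f2 l a h1 h2
    match l with
    | [] => rw [cgo_nil, cgo_nil]
  | succ n ih =>
    intro f2 l a h1 h2
    match l with
    | [] => rw [cgo_nil, cgo_nil]
    | c :: rest =>
      obtain ⟨m, rfl⟩ := Nat.exists_eq_succ_of_ne_zero (n := f2) (by simp at h2; omega)
      rw [PySem.Chars.count.go.eq_3, PySem.Chars.count.go.eq_3]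
      by_cases hp : sep.isPrefixOf (c :: rest)
      · rw [if_pos hp, if_pos hp]
        exact ih m _ _ (by simp at h1 ⊢; omega) (by simp at h2 ⊢; omega)
      · rw [if_neg hp, if_neg hp]
        exact ih m rest a (by simp at h1 ⊢; omega) (by simp at h2 ⊢; omega)

-- splitOn.go and count.go run the same scan: pieces = 1 + separators found
theorem go_len_cgo (sep : List Char) : ∀ (f : Nat) (l cur : List Char) (acc : List (List Char)) (a : Nat),
    (PySem.Chars.splitOn.go sep f l cur acc).length + a
      = acc.length + 1 + PySem.Chars.count.go sep f l a := by
  intro f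
  induction f with
  | zero =>
    intro l cur acc a
    rw [PySem.Chars.splitOn.go.eq_1, PySem.Chars.count.go.eq_1]
    simp
  | succ n ih =>
    intro l cur acc a
    match l with
    | [] => rw [go_nil, cgo_nil]; simp
    | c :: rest =>
      rw [PySem.Chars.splitOn.go.eq_3, PySem.Chars.count.go.eq_3]
      by_cases hp : sep.isPrefixOf (c :: rest)
      · rw [if_pos hp, if_pos hp]
        have := ih (List.drop sep.length (c :: rest)) [] (cur.reverse :: acc) (a + 1)
        simp at this ⊢
        omega
      · rw [if_neg hp, if_neg hp]
        exact ih rest (c :: cur) acc a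

-- len(s.split(sep)) = s.count(sep) + 1 for a nonempty sep
theorem splitOn_len_count (s sep : List Char) (hs : sep ≠ []) :
    (PySem.Chars.splitOn s sep).length = 1 + PySem.Chars.count s sep := by
  have h := go_len_cgo sep (s.length + 1) s [] [] 0
  rw [cgo_fuelirr sep hs (s.length + 1) s.length s 0 (by omega) (by omega)] at h
  have hE : sep.isEmpty = false := by
    cases sep with
    | nil => exact absurd rfl hs
    | cons a t => rfl
  simp [PySem.Chars.splitOn, PySem.Chars.count, hE] at h ⊢
  omega

-- find.go with offset k = find + k (or -1)
theorem fgo_eq (sub : List Char) (hs : sub ≠ []) : ∀ (l : List Char) (k : Nat),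
    PySem.Chars.find.go sub l k
      = if PySem.Chars.find l sub = -1 then -1 else PySem.Chars.find l sub + k := by
  have hE : sub.isEmpty = false := by
    cases sub with
    | nil => exact absurd rfl hs
    | cons a t => rfl
  intro l
  induction l with
  | nil =>
    intro k
    simp [PySem.Chars.find, PySem.Chars.find.go, hE]
  | cons c rest ih =>
    intro k
    by_cases hp : sub.isPrefixOf (c :: rest)
    · rw [PySem.Chars.find.go, if_pos hp]
      have hf : PySem.Chars.find (c :: rest) sub = 0 := by
        rw [PySem.Chars.find, PySem.Chars.find.go, if_pos hp]
        rfl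
      rw [hf]
      norm_num
    · have hstep : ∀ (j : Nat), PySem.Chars.find.go sub (c :: rest) j = PySem.Chars.find.go sub rest (j + 1) := by
        intro j
        rw [PySem.Chars.find.go, if_neg hp]
      have hf : PySem.Chars.find (c :: rest) sub
          = if PySem.Chars.find rest sub = -1 then -1 else PySem.Chars.find rest sub + 1 := by
        rw [PySem.Chars.find, hstep 0, ih 1]
        norm_num
      rw [hstep k, ih (k + 1), hf]
      by_cases h0 : PySem.Chars.find rest sub = -1
      · simp [h0]
      · have hge : 0 ≤ PySem.Chars.find rest sub := by
          rw [PySem.Chars.find_nonneg_iff]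
          exact (PySem.Chars.isIn_iff_infix _ _).mp (by
            have := (PySem.Chars.find_ne_neg_one_iff rest sub).mp h0
            exact (PySem.Chars.isIn_iff_infix _ _).mpr this)
        simp only [if_neg h0]
        rw [if_neg (by omega)]
        push_cast
        ring

-- splitting at the FIRST occurrence of the separator (= str.partition's decomposition)
theorem go_split_first (sep : List Char) (hs : sep ≠ []) : ∀ (f : Nat), ∀ (l cur : List Char) (acc : List (List Char)),
    l.length < f → PySem.Chars.isIn sep l = true →
    PySem.Chars.splitOn.go sep f l cur acc
      = acc.reverse ++ (cur.reverse ++ l.take (PySem.Chars.find l sep).toNat)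
          :: PySem.Chars.splitOn (l.drop ((PySem.Chars.find l sep).toNat + sep.length)) sep := by
  have hE : sep.isEmpty = false := by
    cases sep with
    | nil => exact absurd rfl hs
    | cons a t => rfl
  have hsl : 1 ≤ sep.length := List.length_pos_iff.mpr hs
  intro f
  induction f with
  | zero => intro l cur acc h1 _; omega
  | succ n ih =>
    intro l cur acc h1 hin
    match l with
    | [] =>
      exfalso
      have : PySem.Chars.find [] sep = -1 := by
        simp [PySem.Chars.find, PySem.Chars.find.go, hE]
      have h2 := (PySem.Chars.find_ne_neg_one_iff ([] : List Char) sep).mpr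
        ((PySem.Chars.isIn_iff_infix _ _).mp hin)
      exact h2 this
    | c :: rest =>
      rw [PySem.Chars.splitOn.go.eq_3]
      by_cases hp : sep.isPrefixOf (c :: rest)
      · rw [if_pos hp]
        have hf : PySem.Chars.find (c :: rest) sep = 0 := by
          rw [PySem.Chars.find, PySem.Chars.find.go, if_pos hp]
          rfl
        rw [hf]
        have hd : (List.drop sep.length (c :: rest)).length < n := by
          simp at h1 ⊢
          omega
        rw [go_acc sep n _ [] (cur.reverse :: acc),
            go_fuelirr sep hs n ((List.drop sep.length (c :: rest)).length + 1) _ [] [] hd (by omega)]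
        simp [PySem.Chars.splitOn]
      · rw [if_neg hp]
        have hf0 : PySem.Chars.find (c :: rest) sep
            = if PySem.Chars.find rest sep = -1 then -1 else PySem.Chars.find rest sep + 1 := by
          rw [PySem.Chars.find, PySem.Chars.find.go, if_neg hp, fgo_eq sep hs rest 1]
          norm_num
        have hne : PySem.Chars.find (c :: rest) sep ≠ -1 :=
          (PySem.Chars.find_ne_neg_one_iff _ sep).mpr ((PySem.Chars.isIn_iff_infix _ _).mp hin)
        have hrne : PySem.Chars.find rest sep ≠ -1 := by
          intro h0
          rw [hf0, if_pos h0] at hne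
          exact hne rfl
        have hrge : 0 ≤ PySem.Chars.find rest sep := by
          rw [PySem.Chars.find_nonneg_iff]
          exact (PySem.Chars.isIn_iff_infix _ _).mp
            ((PySem.Chars.isIn_iff_infix _ _).mpr ((PySem.Chars.find_ne_neg_one_iff rest sep).mp hrne))
        have hrin : PySem.Chars.isIn sep rest = true :=
          (PySem.Chars.isIn_iff_infix _ _).mpr ((PySem.Chars.find_ne_neg_one_iff rest sep).mp hrne)
        rw [ih rest (c :: cur) acc (by simp at h1 ⊢; omega) hrin]
        have htn : (PySem.Chars.find (c :: rest) sep).toNat = (PySem.Chars.find rest sep).toNat + 1 := by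
          rw [hf0, if_neg hrne]
          omega
        have hdr : (PySem.Chars.find rest sep).toNat + 1 + sep.length
            = ((PySem.Chars.find rest sep).toNat + sep.length) + 1 := by omega
        rw [htn, hdr]
        simp [List.take_succ_cons, List.drop_succ_cons]

theorem split_first (l sep : List Char) (hs : sep ≠ []) (hin : PySem.Chars.isIn sep l = true) :
    PySem.Chars.splitOn l sep
      = l.take (PySem.Chars.find l sep).toNat
          :: PySem.Chars.splitOn (l.drop ((PySem.Chars.find l sep).toNat + sep.length)) sep := by
  have := go_split_first sep hs (l.length + 1) l [] [] (by omega) hin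
  simpa [PySem.Chars.splitOn] using this

-- split_first for the literal '::' separator, with the length evaluated
theorem split_first2 (l : List Char) (hin : PySem.Chars.isIn [':', ':'] l = true) :
    PySem.Chars.splitOn l [':', ':']
      = l.take (PySem.Chars.find l [':', ':']).toNat
          :: PySem.Chars.splitOn (l.drop ((PySem.Chars.find l [':', ':']).toNat + 2)) [':', ':'] := by
  have h := split_first l [':', ':'] (by decide) hin
  simpa using h

-- no occurrence of the separator: split is the whole string
theorem go_noin (sep : List Char) (hs : sep ≠ []) : ∀ (f : Nat), ∀ (l cur : List Char) (acc : List (List Char)),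
    l.length < f → PySem.Chars.isIn sep l = false →
    PySem.Chars.splitOn.go sep f l cur acc = acc.reverse ++ [cur.reverse ++ l] := by
  have hE : sep.isEmpty = false := by
    cases sep with
    | nil => exact absurd rfl hs
    | cons a t => rfl
  intro f
  induction f with
  | zero => intro l cur acc h1 _; omega
  | succ n ih =>
    intro l cur acc h1 hnin
    match l with
    | [] => rw [go_nil]; simp
    | c :: rest =>
      rw [PySem.Chars.splitOn.go.eq_3]
      by_cases hp : sep.isPrefixOf (c :: rest)
      · exfalso
        have hf : PySem.Chars.find (c :: rest) sep = 0 := by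
          rw [PySem.Chars.find, PySem.Chars.find.go, if_pos hp]
          rfl
        have : PySem.Chars.isIn sep (c :: rest) = true := by
          simp [PySem.Chars.isIn, hf]
        rw [this] at hnin
        simp at hnin
      · rw [if_neg hp]
        have hrnin : PySem.Chars.isIn sep rest = false := by
          by_contra hx
          have hrin : PySem.Chars.isIn sep rest = true := by
            cases h : PySem.Chars.isIn sep rest
            · exact absurd h hx
            · rfl
          have hrne := (PySem.Chars.find_ne_neg_one_iff rest sep).mpr
            ((PySem.Chars.isIn_iff_infix _ _).mp hrin)
          have hrge : 0 ≤ PySem.Chars.find rest sep := by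
            rw [PySem.Chars.find_nonneg_iff]
            exact (PySem.Chars.isIn_iff_infix _ _).mp hrin
          have hf0 : PySem.Chars.find (c :: rest) sep = PySem.Chars.find rest sep + 1 := by
            rw [PySem.Chars.find, PySem.Chars.find.go, if_neg hp, fgo_eq sep hs rest 1, if_neg hrne]
            norm_num
          have : PySem.Chars.isIn sep (c :: rest) = true := by
            simp only [PySem.Chars.isIn, hf0]
            simp
            omega
          rw [this] at hnin
          simp at hnin
        rw [ih rest (c :: cur) acc (by simp at h1 ⊢; omega) hrnin]
        simp

theorem split_noin (l sep : List Char) (hs : sep ≠ []) (hnin : PySem.Chars.isIn sep l = false) :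
    PySem.Chars.splitOn l sep = [l] := by
  have := go_noin sep hs (l.length + 1) l [] [] (by omega) hnin
  simpa [PySem.Chars.splitOn] using this

-- single-char split distributes over a ':' boundary
theorem go_append_colon : ∀ (x : List Char), ∀ (f : Nat) (y cur : List Char) (acc : List (List Char)),
    x.length + y.length + 1 < f →
    PySem.Chars.splitOn.go [':'] f (x ++ ':' :: y) cur acc
      = acc.reverse ++ PySem.Chars.splitOn.go [':'] (x.length + 1) x cur [] ++ PySem.Chars.splitOn y [':'] := by
  intro x
  induction x with
  | nil =>
    intro f y cur acc h
    obtain ⟨n, rfl⟩ := Nat.exists_eq_succ_of_ne_zero (n := f) (by omega)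
    rw [List.nil_append, PySem.Chars.splitOn.go.eq_3]
    have hp : ([':'] : List Char).isPrefixOf (':' :: y) = true := by simp [List.isPrefixOf]
    rw [if_pos hp]
    simp only [List.length_cons, List.length_nil, List.drop_succ_cons, List.drop_zero]
    rw [go_acc [':'] n y [] (cur.reverse :: acc),
        go_fuelirr [':'] (by decide) n (y.length + 1) y [] [] (by simp at h; omega) (by omega)]
    rw [go_nil]
    simp [PySem.Chars.splitOn]
  | cons c x' ih =>
    intro f y cur acc h
    obtain ⟨n, rfl⟩ := Nat.exists_eq_succ_of_ne_zero (n := f) (by omega)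
    rw [List.cons_append, PySem.Chars.splitOn.go.eq_3]
    by_cases hc : c = ':'
    · subst hc
      have hp : ([':'] : List Char).isPrefixOf (':' :: (x' ++ ':' :: y)) = true := by
        simp [List.isPrefixOf]
      rw [if_pos hp]
      simp only [List.length_cons, List.length_nil, List.drop_succ_cons, List.drop_zero]
      rw [ih n y [] (cur.reverse :: acc) (by simp at h ⊢; omega)]
      have hmid : PySem.Chars.splitOn.go [':'] (x'.length + 1 + 1) (':' :: x') cur []
          = [cur.reverse] ++ PySem.Chars.splitOn.go [':'] (x'.length + 1) x' [] [] := by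
        rw [PySem.Chars.splitOn.go.eq_3]
        have hp2 : ([':'] : List Char).isPrefixOf (':' :: x') = true := by simp [List.isPrefixOf]
        rw [if_pos hp2]
        simp only [List.length_cons, List.length_nil, List.drop_succ_cons, List.drop_zero]
        rw [go_acc [':'] (x'.length + 1) x' [] [cur.reverse]]
        simp
      rw [hmid]
      simp
    · have hb : (':' == c) = false := beq_eq_false_iff_ne.mpr (Ne.symm hc)
      have hp : ([':'] : List Char).isPrefixOf (c :: (x' ++ ':' :: y)) = false := by
        simp [List.isPrefixOf, hb]
      rw [hp]
      simp only [Bool.false_eq_true, if_false]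
      rw [ih n y (c :: cur) acc (by simp at h ⊢; omega)]
      have hmid : PySem.Chars.splitOn.go [':'] (x'.length + 1 + 1) (c :: x') cur []
          = PySem.Chars.splitOn.go [':'] (x'.length + 1) x' (c :: cur) [] := by
        rw [PySem.Chars.splitOn.go.eq_3]
        have hp2 : ([':'] : List Char).isPrefixOf (c :: x') = false := by
          simp [List.isPrefixOf, hb]
        rw [hp2]
        simp only [Bool.false_eq_true, if_false, List.length_cons]
      simp only [List.length_cons]
      rw [hmid]

theorem splitOn_append_colon (x y : List Char) :
    PySem.Chars.splitOn (x ++ ':' :: y) [':']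
      = PySem.Chars.splitOn x [':'] ++ PySem.Chars.splitOn y [':'] := by
  have h := go_append_colon x ((x ++ ':' :: y).length + 1) y [] [] (by simp)
  simpa [PySem.Chars.splitOn] using h

-- splitting the spliced '0:'-runs: each contributes one literal '0' group
theorem splitOn_flat_pre (m : Nat) (y : List Char) :
    PySem.Chars.splitOn ((List.replicate m ['0', ':']).flatten ++ y) [':']
      = List.replicate m ['0'] ++ PySem.Chars.splitOn y [':'] := by
  induction m with
  | zero => simp
  | succ k ih =>
    have hflat : (List.replicate (k + 1) ['0', ':']).flatten
        = '0' :: ':' :: (List.replicate k ['0', ':']).flatten := by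
      rw [List.replicate_succ]
      simp
    rw [hflat]
    have : ('0' :: ':' :: (List.replicate k ['0', ':']).flatten) ++ y
        = ['0'] ++ ':' :: ((List.replicate k ['0', ':']).flatten ++ y) := by simp
    rw [this, splitOn_append_colon, ih]
    have h0 : PySem.Chars.splitOn ['0'] [':'] = [['0']] := by decide
    rw [h0]
    simp [List.replicate_succ]

theorem splitOn_zero_flat (k : Nat) :
    PySem.Chars.splitOn ('0' :: (List.replicate k [':', '0']).flatten) [':']
      = List.replicate (k + 1) ['0'] := by
  induction k with
  | zero => decide
  | succ j ih =>
    have hflat : (List.replicate (j + 1) [':', '0']).flatten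
        = ':' :: '0' :: (List.replicate j [':', '0']).flatten := by
      rw [List.replicate_succ]
      simp
    rw [hflat]
    have : ('0' :: ':' :: '0' :: (List.replicate j [':', '0']).flatten)
        = ['0'] ++ ':' :: ('0' :: (List.replicate j [':', '0']).flatten) := by simp
    rw [this, splitOn_append_colon, ih]
    have h0 : PySem.Chars.splitOn ['0'] [':'] = [['0']] := by decide
    rw [h0]
    simp [List.replicate_succ]

theorem splitOn_tailpad (cs : List Char) (k : Nat) :
    PySem.Chars.splitOn (cs ++ (List.replicate k [':', '0']).flatten) [':']
      = PySem.Chars.splitOn cs [':'] ++ List.replicate k ['0'] := by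
  cases k with
  | zero => simp
  | succ j =>
    have hflat : (List.replicate (j + 1) [':', '0']).flatten
        = ':' :: '0' :: (List.replicate j [':', '0']).flatten := by
      rw [List.replicate_succ]
      simp
    rw [hflat]
    have : cs ++ ':' :: '0' :: (List.replicate j [':', '0']).flatten
        = cs ++ ':' :: ('0' :: (List.replicate j [':', '0']).flatten) := rfl
    rw [this, splitOn_append_colon, splitOn_zero_flat]

-- the two count forms agree for the single-char separator
theorem splitOn_colon_len (l : List Char) :
    (PySem.Chars.splitOn l [':']).length = l.count ':' + 1 := by
  have h := go1_len (l.length + 1) l [] [] (by omega)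
  have e : PySem.Chars.splitOn l [':']
      = PySem.Chars.splitOn.go [':'] (l.length + 1) l [] [] := rfl
  rw [e, h]
  simp
  omega

theorem count_colon_eq (l : List Char) : PySem.Chars.count l [':'] = l.count ':' := by
  have h1 := splitOn_len_count l [':'] (by decide)
  have h2 := splitOn_colon_len l
  omega

-- ---------- A = normal form (the array loops produce take ++ map ++ pad ++ map) ----------

theorem A_eq_pvConcat (ipv6 : String) : ConvertIPv6ShortToIPv6Full ipv6 = pvConcat ipv6 := by
  unfold ConvertIPv6ShortToIPv6Full pvConcat
  by_cases hg : (pySplit ipv6 "::").length > 2 ∨ (pySplit ipv6 ":").length > 8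
  · simp only [if_pos hg]
  · simp only [if_neg hg]
    rw [not_or] at hg
    obtain ⟨h2, h8⟩ := hg
    have hcount := splitOn2_count ipv6.toList
    have h8' : ipv6.toList.count ':' + 1 ≤ 8 := by
      have := pySplit_colon_len ipv6
      omega
    have hps : pySplit ipv6 "::" = (PySem.Chars.splitOn ipv6.toList [':',':']).map String.ofList := rfl
    have take_all : ∀ (l : List String) (n : Nat), l.length ≤ n → l.take n = l :=
      fun l n hn => List.take_of_length_le hn
    rcases hL : PySem.Chars.splitOn ipv6.toList [':',':'] with _ | ⟨pc, _ | ⟨qc, _ | ⟨rc, L3⟩⟩⟩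
    · -- zero pieces: everything below the guard is a closed computation
      rw [hL] at hps
      simp only [hps, List.map_nil]
      decide
    · -- no '::' in the string: one piece
      rw [hL] at hps
      rw [hL] at hcount
      simp only [List.map_cons, List.map_nil, List.sum_cons, List.sum_nil, List.length_cons,
        List.length_nil] at hcount
      have hP : (pySplit (String.ofList pc) ":").length = pc.count ':' + 1 := by
        simpa using pySplit_colon_len (String.ofList pc)
      rw [hps]
      simp only [List.map_cons, List.map_nil]
      simp [List.length_map]
      have hle : 0 + (pySplit (String.ofList pc) ":").length
          ≤ (List.replicate 8 "0000" : List String).length := by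
        simp [hP]; omega
      have hfwd := fwd_loop (fun i => PySem.Str.zfill i 4) (pySplit (String.ofList pc) ":")
        (List.replicate 8 "0000") 0 hle
      push_cast at hfwd
      rw [hfwd]
      simp only [List.take_zero, List.nil_append, Nat.zero_add]
      rw [show (["0000","0000","0000","0000","0000","0000","0000","0000"] : List String)
            = List.replicate 8 "0000" from rfl, List.drop_replicate]
    · -- exactly one '::': two pieces
      rw [hL] at hps
      rw [hL] at hcount
      simp only [List.map_cons, List.map_nil, List.sum_cons, List.sum_nil, List.length_cons,
        List.length_nil] at hcount
      have hP : (pySplit (String.ofList pc) ":").length = pc.count ':' + 1 := by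
        simpa using pySplit_colon_len (String.ofList pc)
      have hQ : (pySplit (String.ofList qc) ":").length = qc.count ':' + 1 := by
        simpa using pySplit_colon_len (String.ofList qc)
      have hPQ : (pySplit (String.ofList pc) ":").length + (pySplit (String.ofList qc) ":").length ≤ 7 := by
        rw [hP, hQ]; omega
      rw [hps]
      simp only [List.map_cons, List.map_nil]
      simp [List.length_map]
      by_cases htl : 4 < (pySplit (String.ofList qc) ":").length
      · simp [htl]
      · simp [htl]
        have hle : 0 + (pySplit (String.ofList pc) ":").length
            ≤ (List.replicate 8 "0000" : List String).length := by
          simp; omega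
        have hfwd := fwd_loop (fun i => PySem.Str.zfill i 4) (pySplit (String.ofList pc) ":")
          (List.replicate 8 "0000") 0 hle
        push_cast at hfwd
        rw [hfwd]
        simp only [List.take_zero, List.nil_append, Nat.zero_add]
        rw [show (["0000","0000","0000","0000","0000","0000","0000","0000"] : List String)
              = List.replicate 8 "0000" from rfl, List.drop_replicate]
        have hble : (pySplit (String.ofList qc) ":").length
            ≤ ((pySplit (String.ofList pc) ":").map (fun i => PySem.Str.zfill i 4)
                ++ List.replicate (8 - (pySplit (String.ofList pc) ":").length) "0000").length := by
          simp; omega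
        have hbwd := bwd_loop_foldr (fun i => PySem.Str.zfill i 4) (pySplit (String.ofList qc) ":")
          ((pySplit (String.ofList pc) ":").map (fun i => PySem.Str.zfill i 4)
            ++ List.replicate (8 - (pySplit (String.ofList pc) ":").length) "0000") hble
        rw [hbwd]
        simp only [List.length_append, List.length_map, List.length_replicate]
        rw [List.take_append]
        rw [take_all _ _ (by simp; omega)]
        rw [List.take_replicate]
        have key : ∀ (A B : Nat), A = B →
            PySem.Str.join ":"
              (((pySplit (String.ofList pc) ":").map (fun i => PySem.Str.zfill i 4)
                  ++ List.replicate A "0000")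
                ++ (pySplit (String.ofList qc) ":").map (fun i => PySem.Str.zfill i 4))
            = PySem.Str.join ":"
              ((pySplit (String.ofList pc) ":").map (fun i => PySem.Str.zfill i 4)
                ++ (List.replicate B "0000"
                  ++ (pySplit (String.ofList qc) ":").map (fun i => PySem.Str.zfill i 4))) := by
          intro A B hAB
          rw [hAB, List.append_assoc]
        exact key _ _ (by simp; omega)
    · -- three or more pieces: contradicts the first guard
      exfalso
      rw [hps, hL] at h2
      simp at h2

-- ---------- B = normal form (text splicing then one uniform zfill pass) ----------

-- the uniform zfill-and-join of char pieces equals Str.join of the zfilled strings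
theorem join_bridge (pieces : List (List Char)) (pad : Nat) (tailp : List (List Char)) :
    PySem.Str.join ":" ((pieces.map String.ofList).map (fun g => PySem.Str.zfill g 4)
        ++ List.replicate pad "0000"
        ++ (tailp.map String.ofList).map (fun g => PySem.Str.zfill g 4))
      = String.ofList (PySem.Chars.join [':']
          ((pieces ++ List.replicate pad ['0'] ++ tailp).map (fun g => PySem.Chars.zfill g 4))) := by
  have hz : PySem.Chars.zfill ['0'] 4 = "0000".toList := by decide
  simp [PySem.Str.join, PySem.Str.zfill, List.map_map, Function.comp_def, List.map_replicate,
    List.map_append, hz]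

set_option maxHeartbeats 2000000 in
theorem B_eq_pvConcat (ipv6 : String) : ConvertIPv6ShortToIPv6Full_alt ipv6 = pvConcat ipv6 := by
  simp only [ConvertIPv6ShortToIPv6Full_alt, pvConcat]
  have h1s : (":" : String).toList = [':'] := by decide
  have hps2 : pySplit ipv6 "::" = (PySem.Chars.splitOn ipv6.toList [':', ':']).map String.ofList := by
    rw [pySplit, show ("::" : String).toList = [':', ':'] from by decide]
  have hlen2 : (PySem.Chars.splitOn ipv6.toList [':', ':']).length
      = 1 + PySem.Chars.count ipv6.toList [':', ':'] := splitOn_len_count _ _ (by decide)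
  have hlen1 : (pySplit ipv6 ":").length = ipv6.toList.count ':' + 1 := pySplit_colon_len ipv6
  have hcnt1 : PySem.Chars.count ipv6.toList [':'] = ipv6.toList.count ':' := count_colon_eq _
  by_cases hg : PySem.Chars.count ipv6.toList [':', ':'] > 1 ∨ PySem.Chars.count ipv6.toList [':'] > 7
  · rw [if_pos hg,
        if_pos (show (pySplit ipv6 "::").length > 2 ∨ (pySplit ipv6 ":").length > 8 by
          rw [hps2, List.length_map, hlen2, hlen1]
          omega)]
  · rw [if_neg hg]
    rw [not_or] at hg
    obtain ⟨g2, g1⟩ := hg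
    rw [if_neg (show ¬ ((pySplit ipv6 "::").length > 2 ∨ (pySplit ipv6 ":").length > 8) by
          rw [hps2, List.length_map, hlen2, hlen1]
          omega)]
    by_cases hin : PySem.Chars.isIn [':', ':'] ipv6.toList = true
    · rw [if_pos hin]
      -- decompose ipv6 at the first '::'
      obtain ⟨i, hI⟩ : ∃ n, (PySem.Chars.find ipv6.toList [':', ':']).toNat = n := ⟨_, rfl⟩
      have hsf := split_first2 ipv6.toList hin
      rw [hI] at hsf ⊢
      -- the piece after the first '::' contains no further '::'
      have hnin : PySem.Chars.isIn [':', ':'] (ipv6.toList.drop (i + 2)) = false := by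
        cases hb : PySem.Chars.isIn [':', ':'] (ipv6.toList.drop (i + 2))
        · rfl
        · exfalso
          have hsp := split_first2 (ipv6.toList.drop (i + 2)) hb
          have hlenY := splitOn_len_count ((ipv6.toList.drop (i + 2)).drop
            ((PySem.Chars.find (ipv6.toList.drop (i + 2)) [':', ':']).toNat + 2)) [':', ':'] (by decide)
          have hge2 : 2 ≤ (PySem.Chars.splitOn (ipv6.toList.drop (i + 2)) [':', ':']).length := by
            rw [hsp]
            simp only [List.length_cons]
            omega
          have hl2 : (PySem.Chars.splitOn ipv6.toList [':', ':']).length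
              = 1 + (PySem.Chars.splitOn (ipv6.toList.drop (i + 2)) [':', ':']).length := by
            rw [hsf]
            simp only [List.length_cons]
            omega
          omega
      have hpostL : PySem.Chars.splitOn (ipv6.toList.drop (i + 2)) [':', ':']
          = [ipv6.toList.drop (i + 2)] := split_noin _ _ (by decide) hnin
      have hsf2 : PySem.Chars.splitOn ipv6.toList [':', ':']
          = [ipv6.toList.take i, ipv6.toList.drop (i + 2)] := by
        rw [hsf, hpostL]
      -- the string really is pre ++ ':' ':' ++ post
      have hfne : PySem.Chars.find ipv6.toList [':', ':'] ≠ -1 :=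
        (PySem.Chars.find_ne_neg_one_iff _ _).mpr ((PySem.Chars.isIn_iff_infix _ _).mp hin)
      have hpref : ([':', ':'] : List Char) <+: ipv6.toList.drop i := by
        have hspec := PySem.Chars.findFrom_natCast_spec ipv6.toList [':', ':'] 0 (by omega)
          (by simpa [PySem.Chars.findFrom_zero] using hfne)
        simpa [PySem.Chars.findFrom_zero, hI] using hspec.2.1
      obtain ⟨t, ht⟩ := hpref
      have hdecomp : ipv6.toList = ipv6.toList.take i ++ ':' :: ':' :: t := by
        conv_lhs => rw [← List.take_append_drop i ipv6.toList]
        rw [← ht]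
        rfl
      have htpost : ipv6.toList.drop (i + 2) = t := by
        have e2 : ipv6.toList.drop (i + 2) = (ipv6.toList.drop i).drop 2 := by
          rw [List.drop_drop]
        rw [e2, ← ht]
        simp
      -- colon counting
      have hccs : ipv6.toList.count ':' = (ipv6.toList.take i).count ':' + t.count ':' + 2 := by
        conv_lhs => rw [hdecomp]
        simp [List.count_append]
        ring
      have hcpre : PySem.Chars.count (ipv6.toList.take i) [':'] = (ipv6.toList.take i).count ':' :=
        count_colon_eq _
      have hcpost : PySem.Chars.count (ipv6.toList.drop (i + 2)) [':']
          = t.count ':' := by rw [htpost]; exact count_colon_eq _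
      have hbound : (ipv6.toList.take i).count ':' + t.count ':' ≤ 5 := by
        rw [hcnt1] at g1
        omega
      -- both sides see the two pieces
      rw [hps2, hsf2]
      simp only [List.map_cons, List.map_nil, List.length_cons, List.length_nil, List.headI,
        List.getD_cons_succ, List.getD_cons_zero]
      have htailL : (pySplit (String.ofList (ipv6.toList.drop (i + 2))) ":").length
          = t.count ':' + 1 := by
        have := pySplit_colon_len (String.ofList (ipv6.toList.drop (i + 2)))
        simpa [htpost] using this
      by_cases hq : PySem.Chars.count (ipv6.toList.drop (i + 2)) [':'] > 3
      · rw [if_pos hq]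
        rw [if_pos (show ((1 : Nat) + 1 == 2) = true from rfl)]
        rw [if_pos (show ((pySplit (String.ofList (ipv6.toList.drop (i + 2))) ":").map
              (fun g => PySem.Str.zfill g 4)).length > 4 by
          rw [List.length_map, htailL]
          rw [hcpost] at hq
          omega)]
      · rw [if_neg hq]
        rw [if_pos (show ((1 : Nat) + 1 == 2) = true from rfl)]
        rw [if_neg (show ¬ ((pySplit (String.ofList (ipv6.toList.drop (i + 2))) ":").map
              (fun g => PySem.Str.zfill g 4)).length > 4 by
          rw [List.length_map, htailL]
          rw [hcpost] at hq
          omega)]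
        -- split of the spliced text
        have hfull : (ipv6.toList.take i) ++ [':']
              ++ (List.replicate (((6 : Int) - PySem.Chars.count (ipv6.toList.take i) [':']
                    - PySem.Chars.count (ipv6.toList.drop (i + 2)) [':']).toNat) ['0', ':']).flatten
              ++ ipv6.toList.drop (i + 2)
            = (ipv6.toList.take i) ++ ':' ::
                ((List.replicate (((6 : Int) - PySem.Chars.count (ipv6.toList.take i) [':']
                    - PySem.Chars.count (ipv6.toList.drop (i + 2)) [':']).toNat) ['0', ':']).flatten
                  ++ ipv6.toList.drop (i + 2)) := by
          simp
        rw [hfull, splitOn_append_colon, splitOn_flat_pre]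
        -- head/tail splits on the string side
        have hpre_split : pySplit (String.ofList (ipv6.toList.take i)) ":"
            = (PySem.Chars.splitOn (ipv6.toList.take i) [':']).map String.ofList := by
          rw [pySplit, h1s]
          simp
        have hpost_split : pySplit (String.ofList (ipv6.toList.drop (i + 2))) ":"
            = (PySem.Chars.splitOn (ipv6.toList.drop (i + 2)) [':']).map String.ofList := by
          rw [pySplit, h1s]
          simp
        rw [hpre_split, hpost_split, join_bridge]
        -- the padding counts agree
        have htl : (PySem.Chars.splitOn (ipv6.toList.drop (i + 2)) [':']).length
            = t.count ':' + 1 := by rw [htpost]; exact splitOn_colon_len _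
        have harith : (((6 : Int) - PySem.Chars.count (ipv6.toList.take i) [':']
              - PySem.Chars.count (ipv6.toList.drop (i + 2)) [':']).toNat)
            = 8 - (List.map (fun g => PySem.Str.zfill g 4)
                    (List.map String.ofList (PySem.Chars.splitOn (ipv6.toList.take i) [':']))).length
                - (List.map (fun g => PySem.Str.zfill g 4)
                    (List.map String.ofList (PySem.Chars.splitOn (ipv6.toList.drop (i + 2)) [':']))).length := by
          simp only [List.length_map, splitOn_colon_len, htl, hcpre, hcpost]
          omega
        rw [harith, ← List.append_assoc]
    · rw [if_neg hin]
      have hnin : PySem.Chars.isIn [':', ':'] ipv6.toList = false := by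
        cases hb : PySem.Chars.isIn [':', ':'] ipv6.toList
        · rfl
        · exact absurd hb hin
      have hone : PySem.Chars.splitOn ipv6.toList [':', ':'] = [ipv6.toList] :=
        split_noin _ _ (by decide) hnin
      rw [hps2, hone]
      simp only [List.map_cons, List.map_nil, List.length_cons, List.length_nil, List.headI]
      rw [if_neg (show ¬ (((1 : Nat) == 2) = true) from by decide)]
      rw [splitOn_tailpad]
      have hsplit : pySplit (String.ofList ipv6.toList) ":"
          = (PySem.Chars.splitOn ipv6.toList [':']).map String.ofList := by
        rw [pySplit, h1s]
        simp
      rw [hsplit]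
      have hjb := join_bridge (PySem.Chars.splitOn ipv6.toList [':'])
        (((7 : Int) - PySem.Chars.count ipv6.toList [':']).toNat) []
      simp only [List.map_nil, List.append_nil] at hjb
      have hK : ((7 : Int) - PySem.Chars.count ipv6.toList [':']).toNat
          = 8 - (List.map (fun g => PySem.Str.zfill g 4)
                  (List.map String.ofList (PySem.Chars.splitOn ipv6.toList [':']))).length := by
        simp only [List.length_map, splitOn_colon_len, hcnt1]
        rw [hcnt1] at g1
        omega
      rw [← hK, hjb]

-- ===== VERDICT (by name: the statement is the Claim_ definition above) =====
theorem ConvertIPv6ShortToIPv6Full_spec : Claim_equal_ConvertIPv6ShortToIPv6Full := by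
  intro ipv6 _
  unfold Spec_ConvertIPv6ShortToIPv6Full
  rw [A_eq_pvConcat, B_eq_pvConcat]
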